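-- pv_equiv track=rewrite | github.com/NERSC/nersc_chatbot_deploy | src/nersc_chatbot_deploy/util.py | parse_string_to_dict
-- ===== SOURCE A (Python) =====
-- from typing import Dict, Union
--
-- def parse_string_to_dict(input_string: str) -> Dict[str, str]:
--     """
--     Converts a specially formatted string into a dictionary.
--
--     The input string is expected to contain key-value pairs separated by spaces,
--     where keys are prefixed with '--'. Keys without associated values will have an empty string as the value.
--
--     Args:
--         input_string (str): The input string containing key-value pairs.
--
--     Returns:
--         Dict[str, str]: A dictionary representing the key-value pairs from the input string.
--     """
--     # Split the input string into components
--     components = input_string.split()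
--
--     # Initialize an empty dictionary
--     result_dict = {}
--
--     # Iterate through the components and build the dictionary
--     i = 0
--     while i < len(components):
--         if components[i].startswith("--"):
--             key = components[i].lstrip("--")  # Remove the leading '--'
--             # Check if the next component is also a key or if it exists
--             if i + 1 < len(components) and not components[i + 1].startswith("--"):
--                 value = components[i + 1]  # The next component is the value
--                 i += 2  # Move to the next key-value pair
--             else:
--                 value = ""  # No value for this key
--                 i += 1  # Move to the next key
--             result_dict[key] = value
--         else:
--             i += 1  # Move to the next component
--
--     return result_dict
-- ===== SOURCE B (Python) =====
-- def parse_string_to_dict(input_string: str) -> dict: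
--     """Single-pass state machine: carry a pending key instead of index lookahead."""
--     result = {}
--     pending = None
--     for token in input_string.split():
--         if token.startswith("--"):
--             if pending is not None:
--                 result[pending] = ""
--             pending = token.lstrip("--")
--         elif pending is not None:
--             result[pending] = token
--             pending = None
--     if pending is not None:
--         result[pending] = ""
--     return result
-- ===== Notes on version B (the rewrite author's own statement) =====
-- stated objective: simpler
-- what changed: Replaced the index-with-lookahead while loop by a single-pass state machine that carries a pending key and emits (key,"") or (key,value) as tokens arrive.
import Mathlib
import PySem

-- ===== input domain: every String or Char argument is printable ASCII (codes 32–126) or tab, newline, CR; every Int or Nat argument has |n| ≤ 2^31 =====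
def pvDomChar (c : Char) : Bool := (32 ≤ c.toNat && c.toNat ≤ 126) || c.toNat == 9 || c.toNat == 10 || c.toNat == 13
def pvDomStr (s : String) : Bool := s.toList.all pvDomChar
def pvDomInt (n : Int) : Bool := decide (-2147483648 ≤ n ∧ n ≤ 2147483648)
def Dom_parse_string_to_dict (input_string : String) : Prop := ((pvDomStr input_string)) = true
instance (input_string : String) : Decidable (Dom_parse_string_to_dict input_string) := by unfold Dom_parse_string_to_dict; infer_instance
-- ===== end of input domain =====

-- B replaces A's index-with-lookahead loop by a single-pass pending-key state machine; objective: simpler.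

-- ===== PORT A =====
-- exact port of s.lstrip("--"): Python drops every leading character in the set {'-'}
def pvLstripDashes (s : String) : String :=
  String.ofList (s.toList.dropWhile (· == '-'))

-- A's while loop over components, index-with-lookahead, as structural recursion on the token list
-- (the 'i + 1 < len(components)' lookahead is the [c] vs c :: v :: rest' pattern split)
def pvLoopA : List String → PySem.Dict String String → PySem.Dict String String
  | [], d => d
  | [c], d =>
    if PySem.Str.startswith c "--" then d.insert (pvLstripDashes c) "" else d
  | c :: v :: rest', d =>
    if PySem.Str.startswith c "--" then
      if PySem.Str.startswith v "--" = false then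
        pvLoopA rest' (d.insert (pvLstripDashes c) v)      -- i += 2
      else
        pvLoopA (v :: rest') (d.insert (pvLstripDashes c) "")      -- i += 1
    else pvLoopA (v :: rest') d                                       -- i += 1

def parse_string_to_dict (input_string : String) : List (String × String) :=
  (pvLoopA (PySem.Str.split₀ input_string) PySem.Dict.empty).items

-- ===== PORT B =====
-- B's for loop: state = (pending key : Option String, dict so far)
def pvLoopB : List String → Option String → PySem.Dict String String → PySem.Dict String String
  | [], pending, d =>
    match pending with
    | some k => d.insert k ""
    | none => d
  | t :: rest, pending, d =>
    if PySem.Str.startswith t "--" then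
      pvLoopB rest (some (pvLstripDashes t))
        (match pending with | some k => d.insert k "" | none => d)
    else
      match pending with
      | some k => pvLoopB rest none (d.insert k t)
      | none => pvLoopB rest none d

def parse_string_to_dict_alt (input_string : String) : List (String × String) :=
  (pvLoopB (PySem.Str.split₀ input_string) none PySem.Dict.empty).items

-- ===== PRECONDITION & SPEC =====
def Spec_parse_string_to_dict (input_string : String) (out : List (String × String)) : Prop := out = parse_string_to_dict_alt input_string
instance (input_string : String) (out : List (String × String)) : Decidable (Spec_parse_string_to_dict input_string out) := by unfold Spec_parse_string_to_dict; infer_instance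

-- ===== CLAIM (what is proved, stated in full; the proofs are below) =====
def Claim_equal_parse_string_to_dict : Prop := ∀ (input_string : String), Dom_parse_string_to_dict input_string → Spec_parse_string_to_dict input_string (parse_string_to_dict input_string)

-- ===== LEMMAS AND PROOFS =====

-- what A does once it has read a key k and still has toks ahead
def pvPend (toks : List String) (k : String) (d : PySem.Dict String String) :
    PySem.Dict String String :=
  match toks with
  | [] => d.insert k ""
  | v :: rest =>
    if PySem.Str.startswith v "--" = false then pvLoopA rest (d.insert k v)
    else pvLoopA (v :: rest) (d.insert k "")

theorem pvLoopA_dash (c : String) (rest : List String) (d : PySem.Dict String String)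
    (h : PySem.Str.startswith c "--" = true) :
    pvLoopA (c :: rest) d = pvPend rest (pvLstripDashes c) d := by
  have h : PySem.Chars.startswith c.toList ['-', '-'] = true := by
    rw [← h]; simp [PySem.Str.startswith_eq]
  cases rest with
  | nil => simp [pvLoopA, pvPend, h]
  | cons v rest' =>
    by_cases hv : PySem.Chars.startswith v.toList ['-', '-'] = false <;>
      simp [pvLoopA, pvPend, h, hv]

theorem pvLoopA_nodash (c : String) (rest : List String) (d : PySem.Dict String String)
    (h : PySem.Str.startswith c "--" = false) :
    pvLoopA (c :: rest) d = pvLoopA rest d := by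
  have h : PySem.Chars.startswith c.toList ['-', '-'] = false := by
    rw [← h]; simp [PySem.Str.startswith_eq]
  cases rest with
  | nil => simp [pvLoopA, h]
  | cons v rest' => simp [pvLoopA, h]

theorem pvLoopB_eq_pvLoopA (toks : List String) :
    (∀ d, pvLoopB toks none d = pvLoopA toks d) ∧
    (∀ k d, pvLoopB toks (some k) d = pvPend toks k d) := by
  induction toks with
  | nil => exact ⟨fun d => rfl, fun k d => rfl⟩
  | cons t rest ih =>
    obtain ⟨ihn, ihs⟩ := ih
    constructor
    · intro d
      by_cases ht : PySem.Str.startswith t "--" = true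
      · rw [pvLoopA_dash t rest d ht]
        simp only [pvLoopB, ht, if_pos]
        exact ihs _ _
      · have ht' : PySem.Str.startswith t "--" = false := by
          cases h : PySem.Str.startswith t "--" <;> simp_all
        rw [pvLoopA_nodash t rest d ht']
        simp only [pvLoopB, ht', Bool.false_eq_true, if_neg, not_false_iff]
        exact ihn _
    · intro k d
      by_cases ht : PySem.Str.startswith t "--" = true
      · have hp : pvPend (t :: rest) k d = pvPend rest (pvLstripDashes t) (d.insert k "") := by
          simp only [pvPend, ht, Bool.true_eq_false, if_neg, not_false_iff]
          exact pvLoopA_dash t rest (d.insert k "") ht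
        rw [hp]
        simp only [pvLoopB, ht, if_pos]
        exact ihs _ _
      · have ht' : PySem.Str.startswith t "--" = false := by
          cases h : PySem.Str.startswith t "--" <;> simp_all
        simp only [pvLoopB, pvPend, ht', Bool.false_eq_true, if_neg, not_false_iff, if_pos]
        exact ihn _

-- ===== VERDICT (by name: the statement is the Claim_ definition above) =====
theorem parse_string_to_dict_spec : Claim_equal_parse_string_to_dict := by
  intro s _
  unfold Spec_parse_string_to_dict parse_string_to_dict parse_string_to_dict_alt
  rw [(pvLoopB_eq_pvLoopA (PySem.Str.split₀ s)).1]
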